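-- pv_equiv track=rewrite | github.com/laredding2/MIDI2Video | midi2video.py | get_white_key_index
-- ===== SOURCE A (Python) =====
-- from typing import Optional
--
-- PIANO_MIN = 21
--
-- BLACK_KEY_OFFSETS = {1, 3, 6, 8, 10}  # C#, D#, F#, G#, A#
--
-- def is_black_key(midi_note: int) -> bool:
--     return (midi_note % 12) in BLACK_KEY_OFFSETS
--
-- def get_white_key_index(midi_note: int) -> Optional[int]:
--     """Return the index among white keys only, or None if it's a black key."""
--     if is_black_key(midi_note):
--         return None
--     count = 0
--     for n in range(PIANO_MIN, midi_note):
--         if not is_black_key(n):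
--             count += 1
--     return count
-- ===== SOURCE B (Python) =====
-- PIANO_MIN = 21
--
-- _WHITES_BEFORE = [0, 1, 1, 2, 2, 3, 4, 4, 5, 5, 6, 6]  # white keys among offsets 0..r-1
--
-- def get_white_key_index(midi_note):
--     """Return the index among white keys only, or None if it's a black key."""
--     r = midi_note % 12
--     if r in (1, 3, 6, 8, 10):
--         return None
--     # white keys in [0, n) = 7 per octave + remainder table; subtract count below PIANO_MIN (= 12)
--     return max(7 * (midi_note // 12) + _WHITES_BEFORE[r] - 12, 0)
-- ===== Notes on version B (the rewrite author's own statement) =====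
-- stated objective: faster
-- what changed: Replaced the O(n) loop counting white keys from PIANO_MIN up to midi_note with an O(1) closed form: 7 white keys per 12-note octave plus a remainder lookup table, clamped at 0 for notes below PIANO_MIN.
import Mathlib
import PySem

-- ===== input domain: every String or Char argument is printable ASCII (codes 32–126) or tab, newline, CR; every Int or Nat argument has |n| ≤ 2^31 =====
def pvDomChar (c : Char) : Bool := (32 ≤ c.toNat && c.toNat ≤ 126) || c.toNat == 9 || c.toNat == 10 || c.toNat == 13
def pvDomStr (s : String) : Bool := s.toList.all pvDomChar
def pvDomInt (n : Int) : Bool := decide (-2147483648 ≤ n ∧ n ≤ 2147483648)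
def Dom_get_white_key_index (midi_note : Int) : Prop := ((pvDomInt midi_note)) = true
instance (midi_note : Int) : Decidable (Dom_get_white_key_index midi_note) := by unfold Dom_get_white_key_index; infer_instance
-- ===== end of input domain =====

-- B replaces A's counting loop by a closed form (7 white keys per octave + remainder table), clamped at 0 below PIANO_MIN.

-- ===== PORT A =====
def BLACK_KEY_OFFSETS : List Int := [1, 3, 6, 8, 10]

def is_black_key (midi_note : Int) : Bool :=
  decide (PySem.Int.mod midi_note 12 ∈ BLACK_KEY_OFFSETS)

def get_white_key_index (midi_note : Int) : Option Int :=
  if is_black_key midi_note then none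
  else
    some ((PySem.List.pyRange 21 midi_note 1).foldl
      (fun count n => if !is_black_key n then count + 1 else count) 0)

-- ===== PORT B =====
def WHITES_BEFORE : List Int := [0, 1, 1, 2, 2, 3, 4, 4, 5, 5, 6, 6]

def get_white_key_index_alt (midi_note : Int) : Option Int :=
  let r := PySem.Int.mod midi_note 12
  if r = 1 ∨ r = 3 ∨ r = 6 ∨ r = 8 ∨ r = 10 then none
  else
    -- _WHITES_BEFORE[r]: 0 ≤ r < 12 always, so Python's list indexing is exact here
    some (max (7 * PySem.Int.floordiv midi_note 12 + PySem.List.pyGetD WHITES_BEFORE r 0 - 12) 0)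

-- ===== PRECONDITION & SPEC =====
def Spec_get_white_key_index (midi_note : Int) (out : Option Int) : Prop := out = get_white_key_index_alt midi_note
instance (midi_note : Int) (out : Option Int) : Decidable (Spec_get_white_key_index midi_note out) := by unfold Spec_get_white_key_index; infer_instance

-- ===== CLAIM (what is proved, stated in full; the proofs are below) =====
def Claim_equal_get_white_key_index : Prop := ∀ (midi_note : Int), Dom_get_white_key_index midi_note → Spec_get_white_key_index midi_note (get_white_key_index midi_note)

-- ===== LEMMAS AND PROOFS =====

-- B's closed form as a function of n: number of white keys among MIDI notes 0,…,n-1 (shifted by an octave constant)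
def whitesBelow (n : Int) : Int :=
  7 * PySem.Int.floordiv n 12 + PySem.List.pyGetD WHITES_BEFORE (PySem.Int.mod n 12) 0

lemma whitesBelow_succ (n : Int) :
    whitesBelow (n + 1) = whitesBelow n + (if !is_black_key n then 1 else 0) := by
  have h12 : (0 : Int) < 12 := by norm_num
  simp only [whitesBelow, is_black_key, PySem.Int.mod_eq_emod_of_pos h12,
    PySem.Int.floordiv_eq_ediv_of_pos h12]
  have h : n % 12 = 0 ∨ n % 12 = 1 ∨ n % 12 = 2 ∨ n % 12 = 3 ∨ n % 12 = 4 ∨ n % 12 = 5 ∨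
      n % 12 = 6 ∨ n % 12 = 7 ∨ n % 12 = 8 ∨ n % 12 = 9 ∨ n % 12 = 10 ∨ n % 12 = 11 := by
    omega
  rcases h with h|h|h|h|h|h|h|h|h|h|h|h
  · have h1 : (n + 1) % 12 = 1 := by omega
    have h2 : (n + 1) / 12 = n / 12 := by omega
    rw [h, h1, h2, show PySem.List.pyGetD WHITES_BEFORE 1 0 = 1 from by decide,
       show PySem.List.pyGetD WHITES_BEFORE 0 0 = 0 from by decide]
    simp [BLACK_KEY_OFFSETS]
    try omega
  · have h1 : (n + 1) % 12 = 2 := by omega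
    have h2 : (n + 1) / 12 = n / 12 := by omega
    rw [h, h1, h2, show PySem.List.pyGetD WHITES_BEFORE 2 0 = 1 from by decide,
       show PySem.List.pyGetD WHITES_BEFORE 1 0 = 1 from by decide]
    simp [BLACK_KEY_OFFSETS]
    try omega
  · have h1 : (n + 1) % 12 = 3 := by omega
    have h2 : (n + 1) / 12 = n / 12 := by omega
    rw [h, h1, h2, show PySem.List.pyGetD WHITES_BEFORE 3 0 = 2 from by decide,
       show PySem.List.pyGetD WHITES_BEFORE 2 0 = 1 from by decide]
    simp [BLACK_KEY_OFFSETS]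
    try omega
  · have h1 : (n + 1) % 12 = 4 := by omega
    have h2 : (n + 1) / 12 = n / 12 := by omega
    rw [h, h1, h2, show PySem.List.pyGetD WHITES_BEFORE 4 0 = 2 from by decide,
       show PySem.List.pyGetD WHITES_BEFORE 3 0 = 2 from by decide]
    simp [BLACK_KEY_OFFSETS]
    try omega
  · have h1 : (n + 1) % 12 = 5 := by omega
    have h2 : (n + 1) / 12 = n / 12 := by omega
    rw [h, h1, h2, show PySem.List.pyGetD WHITES_BEFORE 5 0 = 3 from by decide,
       show PySem.List.pyGetD WHITES_BEFORE 4 0 = 2 from by decide]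
    simp [BLACK_KEY_OFFSETS]
    try omega
  · have h1 : (n + 1) % 12 = 6 := by omega
    have h2 : (n + 1) / 12 = n / 12 := by omega
    rw [h, h1, h2, show PySem.List.pyGetD WHITES_BEFORE 6 0 = 4 from by decide,
       show PySem.List.pyGetD WHITES_BEFORE 5 0 = 3 from by decide]
    simp [BLACK_KEY_OFFSETS]
    try omega
  · have h1 : (n + 1) % 12 = 7 := by omega
    have h2 : (n + 1) / 12 = n / 12 := by omega
    rw [h, h1, h2, show PySem.List.pyGetD WHITES_BEFORE 7 0 = 4 from by decide,
       show PySem.List.pyGetD WHITES_BEFORE 6 0 = 4 from by decide]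
    simp [BLACK_KEY_OFFSETS]
    try omega
  · have h1 : (n + 1) % 12 = 8 := by omega
    have h2 : (n + 1) / 12 = n / 12 := by omega
    rw [h, h1, h2, show PySem.List.pyGetD WHITES_BEFORE 8 0 = 5 from by decide,
       show PySem.List.pyGetD WHITES_BEFORE 7 0 = 4 from by decide]
    simp [BLACK_KEY_OFFSETS]
    try omega
  · have h1 : (n + 1) % 12 = 9 := by omega
    have h2 : (n + 1) / 12 = n / 12 := by omega
    rw [h, h1, h2, show PySem.List.pyGetD WHITES_BEFORE 9 0 = 5 from by decide,
       show PySem.List.pyGetD WHITES_BEFORE 8 0 = 5 from by decide]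
    simp [BLACK_KEY_OFFSETS]
    try omega
  · have h1 : (n + 1) % 12 = 10 := by omega
    have h2 : (n + 1) / 12 = n / 12 := by omega
    rw [h, h1, h2, show PySem.List.pyGetD WHITES_BEFORE 10 0 = 6 from by decide,
       show PySem.List.pyGetD WHITES_BEFORE 9 0 = 5 from by decide]
    simp [BLACK_KEY_OFFSETS]
    try omega
  · have h1 : (n + 1) % 12 = 11 := by omega
    have h2 : (n + 1) / 12 = n / 12 := by omega
    rw [h, h1, h2, show PySem.List.pyGetD WHITES_BEFORE 11 0 = 6 from by decide,
       show PySem.List.pyGetD WHITES_BEFORE 10 0 = 6 from by decide]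
    simp [BLACK_KEY_OFFSETS]
    try omega
  · have h1 : (n + 1) % 12 = 0 := by omega
    have h2 : (n + 1) / 12 = n / 12 + 1 := by omega
    rw [h, h1, h2, show PySem.List.pyGetD WHITES_BEFORE 0 0 = 0 from by decide,
       show PySem.List.pyGetD WHITES_BEFORE 11 0 = 6 from by decide]
    simp [BLACK_KEY_OFFSETS]
    try omega

lemma whitesBelow_mono (n : Int) (k : Nat) : whitesBelow n ≤ whitesBelow (n + k) := by
  induction k with
  | zero => simp
  | succ k ih =>
    have h := whitesBelow_succ (n + k)
    have : whitesBelow (n + k) ≤ whitesBelow (n + k + 1) := by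
      rw [h]; split_ifs <;> omega
    calc whitesBelow n ≤ whitesBelow (n + k) := ih
      _ ≤ whitesBelow (n + (k + 1 : Nat)) := by push_cast; rw [← add_assoc]; exact this

lemma whitesBelow_21 : whitesBelow 21 = 12 := by decide

lemma count_eq (k : Nat) :
    (PySem.List.pyRange 21 (21 + (k : Int)) 1).foldl
      (fun count n => if !is_black_key n then count + 1 else count) 0
    = whitesBelow (21 + (k : Int)) - 12 := by
  induction k with
  | zero => simp [PySem.List.pyRange_one_eq_nil (by omega : (21:Int) ≤ 21), whitesBelow_21]
  | succ k ih =>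
    have hsplit : (21 : Int) + ((k : Int) + 1) = (21 + (k : Int)) + 1 := by ring
    push_cast
    rw [hsplit, PySem.List.pyRange_one_succ_right (by omega : (21:Int) ≤ 21 + (k:Int)),
      List.foldl_append, ih, whitesBelow_succ]
    simp only [List.foldl_cons, List.foldl_nil]
    split_ifs <;> omega

-- ===== VERDICT (by name: the statement is the Claim_ definition above) =====
theorem get_white_key_index_spec : Claim_equal_get_white_key_index := by
  intro m _
  unfold Spec_get_white_key_index get_white_key_index get_white_key_index_alt
  have hblack : is_black_key m = true ↔
      (PySem.Int.mod m 12 = 1 ∨ PySem.Int.mod m 12 = 3 ∨ PySem.Int.mod m 12 = 6 ∨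
       PySem.Int.mod m 12 = 8 ∨ PySem.Int.mod m 12 = 10) := by
    simp [is_black_key, BLACK_KEY_OFFSETS]
  by_cases hb : is_black_key m = true
  · rw [if_pos hb, if_pos (hblack.mp hb)]
  · rw [if_neg hb, if_neg (fun h => hb (hblack.mpr h))]
    have hclosed : (7 * PySem.Int.floordiv m 12 +
        PySem.List.pyGetD WHITES_BEFORE (PySem.Int.mod m 12) 0) = whitesBelow m := rfl
    rw [hclosed]
    by_cases hm : 21 ≤ m
    · obtain ⟨k, hk⟩ : ∃ k : Nat, m = 21 + (k : Int) := ⟨(m - 21).toNat, by omega⟩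
      subst hk
      rw [count_eq]
      have := whitesBelow_mono 21 k
      rw [whitesBelow_21] at this
      congr 1
      omega
    · rw [PySem.List.pyRange_one_eq_nil (by omega : m ≤ 21)]
      obtain ⟨k, hk⟩ : ∃ k : Nat, (21 : Int) = m + (k : Int) := ⟨(21 - m).toNat, by omega⟩
      have := whitesBelow_mono m k
      rw [← hk, whitesBelow_21] at this
      simp only [List.foldl_nil]
      congr 1
      omega
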